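-- pv_equiv track=rewrite | github.com/xiangli-sophgo/CrossRing | cross_ring_feature/test.py | generate_matrix_and_get_indices
-- ===== SOURCE A (Python) =====
-- def generate_matrix_and_get_indices(rows, cols, zero_rows=None, zero_cols=None):
--     # 创建一个矩阵，初始值为1
--     matrix = [[1 for _ in range(cols)] for _ in range(rows)]
--
--     # 将指定的行设置为0
--     if zero_rows is not None:
--         for row in zero_rows:
--             if 0 <= row < rows:
--                 for col in range(cols):
--                     matrix[row][col] = 0
--
--     # 将指定的列设置为0
--     if zero_cols is not None:
--         for col in zero_cols:
--             if 0 <= col < cols: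
--                 for row in range(rows):
--                     matrix[row][col] = 0
--
--     # 收集所有元素为1的编号
--     indices = []
--     for r in range(rows):
--         for c in range(cols):
--             if matrix[r][c] == 1:
--                 index = r * cols + c
--                 indices.append(index)
--
--     return indices
-- ===== SOURCE B (Python) =====
-- def generate_matrix_and_get_indices(rows, cols, zero_rows=None, zero_cols=None):
--     # membership sets of validated zeroed rows/cols instead of materialising a matrix
--     zr = {r for r in (zero_rows or []) if 0 <= r < rows}
--     zc = {c for c in (zero_cols or []) if 0 <= c < cols}
--     return [r * cols + c
--             for r in range(rows)
--             for c in range(cols)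
--             if r not in zr and c not in zc]
-- ===== Notes on version B (the rewrite author's own statement) =====
-- stated objective: simpler
-- what changed: B drops the mutable rows x cols matrix entirely: it builds two membership sets of validated zeroed row/column indices and emits the surviving flat indices in a single comprehension, instead of allocating, zeroing and then rescanning a nested list.
import Mathlib
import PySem

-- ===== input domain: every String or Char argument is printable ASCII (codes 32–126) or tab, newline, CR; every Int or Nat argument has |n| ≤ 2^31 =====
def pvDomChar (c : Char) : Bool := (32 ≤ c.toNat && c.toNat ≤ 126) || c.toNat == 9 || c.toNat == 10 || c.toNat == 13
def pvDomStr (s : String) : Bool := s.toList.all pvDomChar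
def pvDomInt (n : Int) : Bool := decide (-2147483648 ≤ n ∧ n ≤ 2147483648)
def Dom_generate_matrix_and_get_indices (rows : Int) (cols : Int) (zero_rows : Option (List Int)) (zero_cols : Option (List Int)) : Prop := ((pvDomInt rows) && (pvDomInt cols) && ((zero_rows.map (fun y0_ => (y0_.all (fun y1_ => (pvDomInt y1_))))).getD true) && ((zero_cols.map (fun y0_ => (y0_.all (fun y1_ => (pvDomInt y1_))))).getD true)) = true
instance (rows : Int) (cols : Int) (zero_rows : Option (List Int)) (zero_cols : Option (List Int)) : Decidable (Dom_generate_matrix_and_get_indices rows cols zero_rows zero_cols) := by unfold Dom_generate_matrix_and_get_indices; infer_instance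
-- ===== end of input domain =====

-- B replaces A's mutable matrix by two membership sets of validated zeroed rows/cols
-- and collects the surviving flat indices in one comprehension (objective: simpler).

-- ===== PORT A =====
-- matrix[row][col] = v  — every use is guarded by 0 ≤ row < rows / 0 ≤ col < cols,
-- where Python's non-negative list assignment is exactly List.set at the Nat index.
def pvSetCell (m : List (List Int)) (row col : Int) (v : Int) : List (List Int) :=
  m.set row.toNat ((m.getD row.toNat []).set col.toNat v)

-- matrix[r][c] — only read with 0 ≤ r < rows, 0 ≤ c < cols (exact there).
def pvCell (m : List (List Int)) (r c : Int) : Int :=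
  (m.getD r.toNat []).getD c.toNat 0

def generate_matrix_and_get_indices (rows : Int) (cols : Int) (zero_rows : Option (List Int)) (zero_cols : Option (List Int)) : List Int :=
  let m0 := (PySem.List.pyRange 0 rows 1).map (fun _ => (PySem.List.pyRange 0 cols 1).map (fun _ => (1 : Int)))
  let m1 := match zero_rows with
    | none => m0
    | some zrs => zrs.foldl (fun m row =>
        if 0 ≤ row ∧ row < rows then
          (PySem.List.pyRange 0 cols 1).foldl (fun m' col => pvSetCell m' row col 0) m
        else m) m0
  let m2 := match zero_cols with
    | none => m1
    | some zcs => zcs.foldl (fun m col =>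
        if 0 ≤ col ∧ col < cols then
          (PySem.List.pyRange 0 rows 1).foldl (fun m' row => pvSetCell m' row col 0) m
        else m) m1
  (PySem.List.pyRange 0 rows 1).foldl (fun acc r =>
    (PySem.List.pyRange 0 cols 1).foldl (fun acc c =>
      if pvCell m2 r c == 1 then acc ++ [r * cols + c] else acc) acc) []

-- ===== PORT B =====
def generate_matrix_and_get_indices_alt (rows : Int) (cols : Int) (zero_rows : Option (List Int)) (zero_cols : Option (List Int)) : List Int :=
  let zr : PySem.Set Int := PySem.Set.ofList ((zero_rows.getD []).filter (fun r => decide (0 ≤ r ∧ r < rows)))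
  let zc : PySem.Set Int := PySem.Set.ofList ((zero_cols.getD []).filter (fun c => decide (0 ≤ c ∧ c < cols)))
  (PySem.List.pyRange 0 rows 1).flatMap (fun r =>
    ((PySem.List.pyRange 0 cols 1).filter
        (fun c => !(PySem.Set.contains zr r) && !(PySem.Set.contains zc c))).map
      (fun c => r * cols + c))

-- ===== PRECONDITION & SPEC =====
def Spec_generate_matrix_and_get_indices (rows : Int) (cols : Int) (zero_rows : Option (List Int)) (zero_cols : Option (List Int)) (out : List Int) : Prop := out = generate_matrix_and_get_indices_alt rows cols zero_rows zero_cols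
instance (rows : Int) (cols : Int) (zero_rows : Option (List Int)) (zero_cols : Option (List Int)) (out : List Int) : Decidable (Spec_generate_matrix_and_get_indices rows cols zero_rows zero_cols out) := by unfold Spec_generate_matrix_and_get_indices; infer_instance

-- ===== CLAIM (what is proved, stated in full; the proofs are below) =====
def Claim_equal_generate_matrix_and_get_indices : Prop := ∀ (rows : Int) (cols : Int) (zero_rows : Option (List Int)) (zero_cols : Option (List Int)), Dom_generate_matrix_and_get_indices rows cols zero_rows zero_cols → Spec_generate_matrix_and_get_indices rows cols zero_rows zero_cols (generate_matrix_and_get_indices rows cols zero_rows zero_cols)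

-- ===== LEMMAS AND PROOFS =====

-- reading the row that pvSetCell touched
theorem pvSetCell_getD_self (m : List (List Int)) (i : Nat) (j : Nat) (v : Int) :
    (m.set i ((m.getD i []).set j v)).getD i [] = (m.getD i []).set j v := by
  by_cases h : i < m.length
  · simp [List.getD, List.getElem?_set_self h]
  · have h' : m.length ≤ i := by omega
    rw [List.set_eq_of_length_le h']
    have h2 : m.getD i [] = [] := by
      simp [List.getD, List.getElem?_eq_none_iff.mpr h']
    rw [h2]
    simp

theorem pvCell_setCell (m : List (List Int)) (row col v : Int) (r c : Int) :
    pvCell (pvSetCell m row col v) r c =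
      if r.toNat = row.toNat ∧ c.toNat = col.toNat ∧ col.toNat < (m.getD row.toNat []).length
      then v else pvCell m r c := by
  unfold pvCell pvSetCell
  by_cases hri : r.toNat = row.toNat
  · rw [hri, pvSetCell_getD_self]
    simp only [List.getD, List.getElem?_set]
    split_ifs with h1 h2 h3 h3 <;> simp_all
  · have h1 : (m.set row.toNat ((m.getD row.toNat []).set col.toNat v)).getD r.toNat []
        = m.getD r.toNat [] := by
      simp [List.getD, List.getElem?_set_ne (fun h => hri h.symm)]
    rw [h1, if_neg (fun h => hri h.1)]

-- pvSetCell preserves every row's length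
theorem pvSetCell_rowlen (m : List (List Int)) (row col v : Int) (i : Nat) :
    ((pvSetCell m row col v).getD i []).length = (m.getD i []).length := by
  unfold pvSetCell
  by_cases h : i = row.toNat
  · subst h; rw [pvSetCell_getD_self]; simp
  · simp [List.getD, List.getElem?_set_ne (by omega : row.toNat ≠ i)]

theorem rowfold_rowlen (row : Int) (l : List Int) (m : List (List Int)) (i : Nat) :
    ((l.foldl (fun m' col => pvSetCell m' row col 0) m).getD i []).length = (m.getD i []).length := by
  induction l generalizing m with
  | nil => rfl
  | cons x xs ih => rw [List.foldl_cons, ih, pvSetCell_rowlen]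

theorem colfold_rowlen (col : Int) (l : List Int) (m : List (List Int)) (i : Nat) :
    ((l.foldl (fun m' row => pvSetCell m' row col 0) m).getD i []).length = (m.getD i []).length := by
  induction l generalizing m with
  | nil => rfl
  | cons x xs ih => rw [List.foldl_cons, ih, pvSetCell_rowlen]

-- pvSetCell preserves the matrix length
theorem pvSetCell_len (m : List (List Int)) (row col v : Int) :
    (pvSetCell m row col v).length = m.length := by
  simp [pvSetCell]

def pvShape (rows cols : Int) (m : List (List Int)) : Prop :=
  m.length = rows.toNat ∧ ∀ i : Nat, i < m.length → (m.getD i []).length = cols.toNat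

theorem pvShape_setCell {rows cols : Int} {m : List (List Int)} (h : pvShape rows cols m)
    (row col v : Int) : pvShape rows cols (pvSetCell m row col v) := by
  refine ⟨by rw [pvSetCell_len]; exact h.1, fun i hi => ?_⟩
  rw [pvSetCell_rowlen]
  exact h.2 i (by rwa [pvSetCell_len] at hi)

theorem pvShape_rowfold {rows cols : Int} {m : List (List Int)} (h : pvShape rows cols m)
    (row : Int) (l : List Int) :
    pvShape rows cols (l.foldl (fun m' col => pvSetCell m' row col 0) m) := by
  induction l generalizing m with
  | nil => exact h
  | cons x xs ih => exact ih (pvShape_setCell h row x 0)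

theorem pvShape_colfold {rows cols : Int} {m : List (List Int)} (h : pvShape rows cols m)
    (col : Int) (l : List Int) :
    pvShape rows cols (l.foldl (fun m' row => pvSetCell m' row col 0) m) := by
  induction l generalizing m with
  | nil => exact h
  | cons x xs ih => exact ih (pvShape_setCell h x col 0)

-- zeroing row `row` over columns 0..k-1
theorem pvCell_rowfold {rows cols : Int} (row r c : Int)
    (hrow : 0 ≤ row ∧ row < rows) (hr : 0 ≤ r ∧ r < rows) (hc : 0 ≤ c ∧ c < cols)
    (k : Nat) (hk : k ≤ cols.toNat) (m : List (List Int)) (hs : pvShape rows cols m) :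
    pvCell (((List.range k).map (fun (j : Nat) => (j : Int))).foldl (fun m' col => pvSetCell m' row col 0) m) r c =
      if r = row ∧ c < (k : Int) then 0 else pvCell m r c := by
  induction k with
  | zero => simp; omega
  | succ n ih =>
    rw [List.range_succ, List.map_append, List.foldl_append]
    simp only [List.map_cons, List.map_nil, List.foldl_cons, List.foldl_nil]
    rw [pvCell_setCell, rowfold_rowlen]
    have hlen : (m.getD row.toNat []).length = cols.toNat := by
      apply hs.2; rw [hs.1]; omega
    rw [ih (by omega)]
    rw [hlen]
    split_ifs <;> first | rfl | omega

-- zeroing column `col` over rows 0..k-1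
theorem pvCell_colfold {rows cols : Int} (col r c : Int)
    (hcol : 0 ≤ col ∧ col < cols) (hr : 0 ≤ r ∧ r < rows) (hc : 0 ≤ c ∧ c < cols)
    (k : Nat) (hk : k ≤ rows.toNat) (m : List (List Int)) (hs : pvShape rows cols m) :
    pvCell (((List.range k).map (fun (j : Nat) => (j : Int))).foldl (fun m' row => pvSetCell m' row col 0) m) r c =
      if c = col ∧ r < (k : Int) then 0 else pvCell m r c := by
  induction k with
  | zero => simp; omega
  | succ n ih =>
    rw [List.range_succ, List.map_append, List.foldl_append]
    simp only [List.map_cons, List.map_nil, List.foldl_cons, List.foldl_nil]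
    rw [pvCell_setCell, colfold_rowlen]
    have hlen : (m.getD ((n : Int)).toNat []).length = cols.toNat := by
      apply hs.2; rw [hs.1]; simp; omega
    rw [ih (by omega)]
    rw [hlen]
    split_ifs <;> first | rfl | omega

theorem pyRange_zero_eq_map_range (n : Int) :
    PySem.List.pyRange 0 n 1 = (List.range n.toNat).map (fun (j : Nat) => (j : Int)) := by
  rw [PySem.List.pyRange_one]
  simp

-- cell after the zero_rows pass
theorem pvCell_zrs_fold {rows cols : Int} (zrs : List Int) (r c : Int)
    (hr : 0 ≤ r ∧ r < rows) (hc : 0 ≤ c ∧ c < cols)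
    (m : List (List Int)) (hs : pvShape rows cols m) :
    pvCell (zrs.foldl (fun m row =>
        if 0 ≤ row ∧ row < rows then
          (PySem.List.pyRange 0 cols 1).foldl (fun m' col => pvSetCell m' row col 0) m
        else m) m) r c =
      if r ∈ zrs then 0 else pvCell m r c := by
  induction zrs generalizing m with
  | nil => simp
  | cons row rest ih =>
    simp only [List.foldl_cons]
    by_cases hg : 0 ≤ row ∧ row < rows
    · rw [if_pos hg]
      rw [ih _ (pvShape_rowfold hs row _)]
      rw [pyRange_zero_eq_map_range]
      rw [pvCell_rowfold row r c hg hr hc cols.toNat le_rfl m hs]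
      by_cases h1 : r ∈ rest
      · simp [h1]
      · by_cases h2 : r = row
        · rw [if_neg h1, if_pos ⟨h2, by omega⟩, if_pos (by simp [h2])]
        · rw [if_neg h1, if_neg (by intro hh; exact h2 hh.1), if_neg (by simp [h1, h2])]
    · rw [if_neg hg]
      rw [ih _ hs]
      have : r ≠ row := by omega
      simp [List.mem_cons, this]

-- cell after the zero_cols pass
theorem pvCell_zcs_fold {rows cols : Int} (zcs : List Int) (r c : Int)
    (hr : 0 ≤ r ∧ r < rows) (hc : 0 ≤ c ∧ c < cols)
    (m : List (List Int)) (hs : pvShape rows cols m) :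
    pvCell (zcs.foldl (fun m col =>
        if 0 ≤ col ∧ col < cols then
          (PySem.List.pyRange 0 rows 1).foldl (fun m' row => pvSetCell m' row col 0) m
        else m) m) r c =
      if c ∈ zcs then 0 else pvCell m r c := by
  induction zcs generalizing m with
  | nil => simp
  | cons col rest ih =>
    simp only [List.foldl_cons]
    by_cases hg : 0 ≤ col ∧ col < cols
    · rw [if_pos hg]
      rw [ih _ (pvShape_colfold hs col _)]
      rw [pyRange_zero_eq_map_range]
      rw [pvCell_colfold col r c hg hr hc rows.toNat le_rfl m hs]
      by_cases h1 : c ∈ rest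
      · simp [h1]
      · by_cases h2 : c = col
        · rw [if_neg h1, if_pos ⟨h2, by omega⟩, if_pos (by simp [h2])]
        · rw [if_neg h1, if_neg (by intro hh; exact h2 hh.1), if_neg (by simp [h1, h2])]
    · rw [if_neg hg]
      rw [ih _ hs]
      have : c ≠ col := by omega
      simp [List.mem_cons, this]

-- the initial all-ones matrix
theorem pvShape_m0 (rows cols : Int) :
    pvShape rows cols ((PySem.List.pyRange 0 rows 1).map (fun _ => (PySem.List.pyRange 0 cols 1).map (fun _ => (1 : Int)))) := by
  constructor
  · simp [PySem.List.length_pyRange_one]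
  · intro i hi
    simp only [List.length_map, PySem.List.length_pyRange_one] at hi
    have : (((PySem.List.pyRange 0 rows 1).map (fun _ => (PySem.List.pyRange 0 cols 1).map (fun _ => (1 : Int)))).getD i []) = (PySem.List.pyRange 0 cols 1).map (fun _ => (1 : Int)) := by
      rw [List.getD_eq_getElem]
      · simp
      · simp [PySem.List.length_pyRange_one]; omega
    rw [this]
    simp [PySem.List.length_pyRange_one]

theorem pvCell_m0 {rows cols : Int} (r c : Int) (hr : 0 ≤ r ∧ r < rows) (hc : 0 ≤ c ∧ c < cols) :
    pvCell ((PySem.List.pyRange 0 rows 1).map (fun _ => (PySem.List.pyRange 0 cols 1).map (fun _ => (1 : Int)))) r c = 1 := by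
  unfold pvCell
  have h1 : (((PySem.List.pyRange 0 rows 1).map (fun _ => (PySem.List.pyRange 0 cols 1).map (fun _ => (1 : Int)))).getD r.toNat []) = (PySem.List.pyRange 0 cols 1).map (fun _ => (1 : Int)) := by
    rw [List.getD_eq_getElem]
    · simp
    · simp [PySem.List.length_pyRange_one]; omega
  rw [h1, List.getD_eq_getElem]
  · simp
  · simp [PySem.List.length_pyRange_one]; omega

-- membership in the validated-zero sets of B
theorem mem_valid_set (xs : Option (List Int)) (bound : Int) (x : Int) (hx : 0 ≤ x ∧ x < bound) :
    PySem.Set.contains (PySem.Set.ofList ((xs.getD []).filter (fun y => decide (0 ≤ y ∧ y < bound)))) x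
      = decide (x ∈ xs.getD []) := by
  have hmem : x ∈ (xs.getD []).filter (fun y => decide (0 ≤ y ∧ y < bound)) ↔ x ∈ xs.getD [] := by
    rw [List.mem_filter]
    exact ⟨fun h => h.1, fun h => ⟨h, by simpa using hx⟩⟩
  by_cases h : x ∈ xs.getD []
  · have h1 : PySem.Set.contains (PySem.Set.ofList ((xs.getD []).filter (fun y => decide (0 ≤ y ∧ y < bound)))) x = true :=
      (PySem.Set.contains_iff _ _).mpr ((PySem.Set.mem_ofList _ _).mpr (hmem.mpr h))
    rw [h1]
    simp [h]
  · have h1 : ¬ PySem.Set.contains (PySem.Set.ofList ((xs.getD []).filter (fun y => decide (0 ≤ y ∧ y < bound)))) x = true :=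
      fun hh => h (hmem.mp ((PySem.Set.mem_ofList _ _).mp ((PySem.Set.contains_iff _ _).mp hh)))
    rw [Bool.not_eq_true] at h1
    rw [h1]
    simp [h]

-- the zero_rows pass preserves the shape
theorem pvShape_zfold {rows cols : Int} {m : List (List Int)} (hs : pvShape rows cols m) (zrs : List Int) :
    pvShape rows cols (zrs.foldl (fun m row =>
      if 0 ≤ row ∧ row < rows then
        (PySem.List.pyRange 0 cols 1).foldl (fun m' col => pvSetCell m' row col 0) m
      else m) m) := by
  induction zrs generalizing m with
  | nil => exact hs
  | cons x xs ih =>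
    simp only [List.foldl_cons]
    split_ifs with h
    · exact ih (pvShape_rowfold hs x _)
    · exact ih hs

-- flatMap congruence on members
theorem pvFlatMap_congr {α β : Type} (l : List α) (f g : α → List β)
    (h : ∀ x ∈ l, f x = g x) : l.flatMap f = l.flatMap g := by
  rw [List.flatMap_def, List.flatMap_def, List.map_congr_left h]

-- the core case: both option arguments present
theorem pvKey (rows cols : Int) (zrs zcs : List Int) :
    generate_matrix_and_get_indices rows cols (some zrs) (some zcs) =
      generate_matrix_and_get_indices_alt rows cols (some zrs) (some zcs) := by
  simp only [generate_matrix_and_get_indices, generate_matrix_and_get_indices_alt]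
  simp only [PySem.List.foldl_append_if, PySem.List.foldl_append_eq_flatMap, List.nil_append]
  apply pvFlatMap_congr
  intro r hrmem
  rw [PySem.List.mem_pyRange_one] at hrmem
  have hr : 0 ≤ r ∧ r < rows := by omega
  congr 1
  apply List.filter_congr
  intro c hcmem
  rw [PySem.List.mem_pyRange_one] at hcmem
  have hc : 0 ≤ c ∧ c < cols := by omega
  rw [mem_valid_set (some zrs) rows r hr, mem_valid_set (some zcs) cols c hc]
  have hs0 := pvShape_m0 rows cols
  have h1 : pvCell (zrs.foldl (fun m row =>
      if 0 ≤ row ∧ row < rows then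
        (PySem.List.pyRange 0 cols 1).foldl (fun m' col => pvSetCell m' row col 0) m
      else m) ((PySem.List.pyRange 0 rows 1).map (fun _ => (PySem.List.pyRange 0 cols 1).map (fun _ => (1 : Int))))) r c
      = if r ∈ zrs then 0 else 1 := by
    rw [pvCell_zrs_fold zrs r c hr hc _ hs0, pvCell_m0 r c hr hc]
  rw [pvCell_zcs_fold zcs r c hr hc _ (pvShape_zfold hs0 zrs), h1]
  by_cases h3 : r ∈ zrs <;> by_cases h4 : c ∈ zcs <;> simp [h3, h4]

-- ===== VERDICT (by name: the statement is the Claim_ definition above) =====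
theorem generate_matrix_and_get_indices_spec : Claim_equal_generate_matrix_and_get_indices := by
  intro rows cols zero_rows zero_cols _
  unfold Spec_generate_matrix_and_get_indices
  cases zero_rows with
  | none =>
    cases zero_cols with
    | none => exact pvKey rows cols [] []
    | some zcs => exact pvKey rows cols [] zcs
  | some zrs =>
    cases zero_cols with
    | none => exact pvKey rows cols zrs []
    | some zcs => exact pvKey rows cols zrs zcs
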